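-- pv_equiv track=rewrite | github.com/dinleo/CodeTest | PyCode/Programmers_Test/Weekly/w4_직업군추천하기.py | solution
-- ===== SOURCE A (Python) =====
-- def solution(table, languages, preference):
--     # table 의 첫원소(직업군)만 jobs 에 저장후 reverse
--     for i in range(len(table)):
--         arr = table[i].split(" ")
--         arr.reverse()
--         table[i] = arr
--     jobs = [i.pop(-1) for i in table]
--     score = [0 for _ in jobs]
--     # 언어가 table[j] 에 있으면 점수 * 선호도 를 score[j] 에 더해줌
--     for i in range(len(languages)):
--         for j in range(len(table)):
--             if languages[i] in table[j]:
--                 score[j] += (table[j].index(languages[i])+1) * preference[i]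
--     # 최고 점수를 갖는 직업들을 추출해 sort 후 pop(0)
--     recomends_jobs = [jobs[i] for i in range(len(score)) if score[i] == max(score)]
--     recomends_jobs.sort()
--     return recomends_jobs[0]
-- ===== SOURCE B (Python) =====
-- def solution(table, languages, preference):
--     # Parse the table once: jobs[j] = job name; inverted index lang -> list of (job_index, weight),
--     # weight = 1-based position of the language counted from the END of the row (first such occurrence wins).
--     jobs = []
--     index = {}
--     for j, row in enumerate(table):
--         parts = row.split(" ")
--         jobs.append(parts[0])
--         langs = parts[1:]
--         seen = {}
--         for p, lang in enumerate(reversed(langs)):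
--             if lang not in seen:
--                 seen[lang] = p + 1
--         for lang, w in seen.items():
--             index.setdefault(lang, []).append((j, w))
--     score = [0] * len(jobs)
--     for lang, pref in zip(languages, preference):
--         for j, w in index.get(lang, ()):
--             score[j] += w * pref
--     best = max(score)
--     return min(job for job, s in zip(jobs, score) if s == best)
-- ===== Notes on version B (the rewrite author's own statement) =====
-- stated objective: faster
-- what changed: A rescans every job row for every applicant language, searching the reversed row twice (membership test + .index) and mutating table in place; B parses the table once into a jobs list plus an inverted index language -> [(job, weight)] with the weight precomputed, so scoring is one dictionary lookup per applicant language and the table is left untouched.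
import Mathlib
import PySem

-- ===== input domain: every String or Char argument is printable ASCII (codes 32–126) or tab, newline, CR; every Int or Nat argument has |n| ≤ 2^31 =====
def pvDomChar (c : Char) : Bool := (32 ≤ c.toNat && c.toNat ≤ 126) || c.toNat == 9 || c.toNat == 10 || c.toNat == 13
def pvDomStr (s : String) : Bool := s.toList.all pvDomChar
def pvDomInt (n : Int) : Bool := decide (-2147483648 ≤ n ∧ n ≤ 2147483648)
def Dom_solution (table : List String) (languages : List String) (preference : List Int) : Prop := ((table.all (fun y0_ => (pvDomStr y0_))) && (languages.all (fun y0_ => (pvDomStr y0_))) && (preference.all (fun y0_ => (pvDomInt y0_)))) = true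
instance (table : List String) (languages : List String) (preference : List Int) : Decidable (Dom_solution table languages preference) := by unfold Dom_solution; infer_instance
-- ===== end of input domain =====

-- B replaces A's per-language scan of every job row (with its repeated reversed-row .index search) by a single
-- parse pass building an inverted index language -> (job, weight); equivalence is about the RETURN value only
-- (A mutates `table` in place, B does not).

-- ===== PORT A =====
def solution (table : List String) (languages : List String) (preference : List Int) : String :=
  -- for i in range(len(table)): arr = table[i].split(" "); arr.reverse(); table[i] = arr
  let tbl0 := table.map (fun s => ((PySem.Str.split? s " ").getD []).reverse)
  -- jobs = [i.pop(-1) for i in table]   (pop(-1) also removes the popped element from each row)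
  let jobs := tbl0.map (fun arr => ((PySem.List.pop? arr).map (·.1)).getD "")
  let tbl := tbl0.map (fun arr => ((PySem.List.pop? arr).map (·.2)).getD [])
  let score0 : List Int := jobs.map (fun _ => (0 : Int))
  let score := (PySem.List.pyRange 0 (languages.length : Int)).foldl (fun score i =>
    (PySem.List.pyRange 0 (tbl.length : Int)).foldl (fun score j =>
      if PySem.List.pyGetD languages i "" ∈ PySem.List.pyGetD tbl j [] then
        score.set j.toNat (PySem.List.pyGetD score j 0 +
          (((PySem.List.index? (PySem.List.pyGetD tbl j []) (PySem.List.pyGetD languages i "")).getD 0 : Int) + 1) *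
            PySem.List.pyGetD preference i 0)
      else score) score) score0
  -- recomends_jobs = [jobs[i] for i in range(len(score)) if score[i] == max(score)]; sort; [0]
  let recs := (PySem.List.pyRange 0 (score.length : Int)).foldl (fun acc i =>
    if PySem.List.pyGetD score i 0 = (PySem.List.max? score (fun x => x)).getD 0 then
      acc ++ [PySem.List.pyGetD jobs i ""]
    else acc) ([] : List String)
  (PySem.List.sorted recs (fun x => x)).headD ""

-- ===== PORT B =====
def solution_alt (table : List String) (languages : List String) (preference : List Int) : String :=
  -- one parse pass: jobs list + inverted index  language -> [(job_index, weight)]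
  let ji := (PySem.List.enumerate table).foldl
    (fun (acc : List String × PySem.Dict String (List (Int × Int))) jr =>
      let parts := (PySem.Str.split? jr.2 " ").getD []
      let job := parts.headD ""
      let langs := parts.drop 1
      -- seen[lang] = 1-based position from the end of the row; first (closest-to-end) occurrence wins
      let seen := (PySem.List.enumerate langs.reverse).foldl
        (fun (d : PySem.Dict String Int) pl =>
          if d.contains pl.2 then d else d.insert pl.2 (pl.1 + 1)) PySem.Dict.empty
      let idx := seen.items.foldl
        (fun (d : PySem.Dict String (List (Int × Int))) lw =>
          d.modify lw.1 [] (fun l => l ++ [(jr.1, lw.2)])) acc.2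
      (acc.1 ++ [job], idx))
    ([], PySem.Dict.empty)
  let jobs := ji.1
  let index := ji.2
  let score0 : List Int := jobs.map (fun _ => (0 : Int))
  let score := (languages.zip preference).foldl (fun score lp =>
    (index.getD lp.1 []).foldl (fun score jw =>
      score.set jw.1.toNat (score.getD jw.1.toNat 0 + jw.2 * lp.2)) score) score0
  let best := (PySem.List.max? score (fun x => x)).getD 0
  ((jobs.zip score).foldl (fun acc p => if p.2 = best then acc ++ [p.1] else acc) ([] : List String)
    |> (fun l => (PySem.List.min? l (fun x => x)).getD ""))

-- ===== PRECONDITION & SPEC =====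
-- Pre_ excludes exactly the inputs where A raises: the empty table (recomends_jobs[0] IndexError) and
-- applicant language lists whose entry i has no preference[i] yet occurs in some job row (preference[i] IndexError).
def Pre_solution (table : List String) (languages : List String) (preference : List Int) : Prop :=
  table ≠ [] ∧ ∀ i : Nat, i < languages.length → preference.length ≤ i →
    ∀ row ∈ table, languages.getD i "" ∉ ((PySem.Str.split? row " ").getD []).drop 1
instance (table : List String) (languages : List String) (preference : List Int) : Decidable (Pre_solution table languages preference) := by unfold Pre_solution; infer_instance

def pvWitness_solution : List String × List String × List Int :=
  (["chef python java", "coder java"], ["python", "java"], [3, 2])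

def Spec_solution (table : List String) (languages : List String) (preference : List Int) (out : String) : Prop := out = solution_alt table languages preference
instance (table : List String) (languages : List String) (preference : List Int) (out : String) : Decidable (Spec_solution table languages preference out) := by unfold Spec_solution; infer_instance

-- ===== CLAIM (what is proved, stated in full; the proofs are below) =====
def Claim_equal_solution : Prop := ∀ (table : List String) (languages : List String) (preference : List Int), Dom_solution table languages preference → Pre_solution table languages preference → Spec_solution table languages preference (solution table languages preference)

-- ===== LEMMAS AND PROOFS =====

-- the language tokens of a row (everything after the job name)
def rowLangs (s : String) : List String := ((PySem.Str.split? s " ").getD []).drop 1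
-- the job name of a row
def jobOf (s : String) : String := ((PySem.Str.split? s " ").getD []).headD ""
-- A's weight for `lang` in a row, as an Option: some (reversed index + 1) when present
def wOpt (s : String) (lang : String) : Option Int :=
  (PySem.List.index? (rowLangs s).reverse lang).map (fun k => (k : Int) + 1)
-- the inverted-index entries for `lang` contributed by the rows of t, enumerated from s
def entriesFor (t : List String) (s : Int) (lang : String) : List (Int × Int) :=
  (PySem.List.enumerate t s).filterMap (fun jr => (wOpt jr.2 lang).map (fun w => (jr.1, w)))
-- B's row step (the body of the parse loop), named for the proofs
def bstep (acc : List String × PySem.Dict String (List (Int × Int))) (jr : Int × String) :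
    List String × PySem.Dict String (List (Int × Int)) :=
  let parts := (PySem.Str.split? jr.2 " ").getD []
  let job := parts.headD ""
  let langs := parts.drop 1
  let seen := (PySem.List.enumerate langs.reverse).foldl
    (fun (d : PySem.Dict String Int) pl =>
      if d.contains pl.2 then d else d.insert pl.2 (pl.1 + 1)) PySem.Dict.empty
  let idx := seen.items.foldl
    (fun (d : PySem.Dict String (List (Int × Int))) lw =>
      d.modify lw.1 [] (fun l => l ++ [(jr.1, lw.2)])) acc.2
  (acc.1 ++ [job], idx)

theorem go_ne_nil (sep : List Char) : ∀ (fuel : Nat) (l cur : List Char) (acc : List (List Char)),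
    PySem.Chars.splitOn.go sep fuel l cur acc ≠ [] := by
  intro fuel
  induction fuel with
  | zero => intro l cur acc; simp [PySem.Chars.splitOn.go]
  | succ n ih =>
    intro l cur acc
    cases l with
    | nil => simp [PySem.Chars.splitOn.go]
    | cons c rest =>
      rw [PySem.Chars.splitOn.go]
      split
      · exact ih _ _ _
      · exact ih _ _ _

theorem split_ne_nil (s : String) : ((PySem.Str.split? s " ").getD []) ≠ [] := by
  simp [PySem.Str.split?, PySem.Chars.split?, PySem.Chars.splitOn]
  exact go_ne_nil _ _ _ _ _

theorem seen_get (lang : String) (l : List String) : ∀ (s : Int) (d : PySem.Dict String Int),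
    ((PySem.List.enumerate l s).foldl
      (fun d pl => if d.contains pl.2 then d else d.insert pl.2 (pl.1 + 1)) d).get? lang =
    (if d.contains lang then d.get? lang
     else (PySem.List.index? l lang).map (fun k => s + (k : Int) + 1)) := by
  induction l with
  | nil =>
    intro s d
    simp only [PySem.List.enumerate, List.foldl_nil]
    split
    · rfl
    · rw [PySem.List.index?_eq_idxOf?]
      simp only [List.idxOf?_nil]
      exact (PySem.Dict.get?_eq_none_iff_contains d lang).2 (by
        rename_i h; simpa using h)
  | cons x t ih =>
    intro s d
    rw [PySem.List.enumerate_cons]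
    simp only [List.foldl_cons]
    by_cases hc : d.contains x
    · rw [if_pos hc, ih]
      by_cases hx : x = lang
      · subst hx; rw [if_pos hc, if_pos hc]
      · have hidx := PySem.List.index?_cons_of_ne (x := x) (v := lang) t hx
        rw [hidx]
        by_cases hcl : d.contains lang
        · rw [if_pos hcl, if_pos hcl]
        · rw [if_neg hcl, if_neg hcl]
          cases h : PySem.List.index? t lang <;> simp <;> ring
    · rw [if_neg hc, ih]
      by_cases hx : x = lang
      · subst hx
        rw [if_pos (PySem.Dict.contains_insert_self d x (s+1)), if_neg hc,
            PySem.List.index?_cons_self, PySem.Dict.get?_insert_self]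
        simp
      · have hidx := PySem.List.index?_cons_of_ne (x := x) (v := lang) t hx
        have hne : lang ≠ x := fun h => hx h.symm
        have hci : (d.insert x (s + 1)).contains lang = d.contains lang := by
          rw [PySem.Dict.contains_insert]; simp [hne]
        rw [hci, hidx, PySem.Dict.get?_insert_of_ne _ _ hne]
        by_cases hcl : d.contains lang
        · rw [if_pos hcl, if_pos hcl]
        · rw [if_neg hcl, if_neg hcl]
          cases h : PySem.List.index? t lang <;> simp <;> ring

-- seen keys stay nodup through the keep-first fold
theorem seen_nodup (l : List (Int × String)) : ∀ (d : PySem.Dict String Int), d.keys.Nodup →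
    (l.foldl (fun d pl => if d.contains pl.2 then d else d.insert pl.2 (pl.1 + 1)) d).keys.Nodup := by
  induction l with
  | nil => intro d h; exact h
  | cons p t ih =>
    intro d h
    simp only [List.foldl_cons]
    split
    · exact ih d h
    · exact ih _ (PySem.Dict.nodup_keys_insert _ _ _ h)

-- filter of items on a key, under nodup keys, is the find? singleton
theorem filter_items_eq (c : String) : ∀ (its : List (String × Int)), (its.map (·.1)).Nodup →
    its.filter (fun p => p.1 == c) =
      (match its.find? (fun p => p.1 == c) with
       | some p => [p] | none => []) := by
  intro its
  induction its with
  | nil => intro _; rfl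
  | cons p t ih =>
    intro h
    simp only [List.map_cons, List.nodup_cons] at h
    by_cases hp : p.1 = c
    · subst hp
      rw [List.filter_cons_of_pos (by simp), List.find?_cons_of_pos (by simp)]
      have : t.filter (fun q => q.1 == p.1) = [] := by
        rw [List.filter_eq_nil_iff]
        intro q hq
        simp only [beq_iff_eq]
        intro hq1
        exact h.1 (hq1 ▸ List.mem_map_of_mem hq)
      rw [this]
    · rw [List.filter_cons_of_neg (by simpa using hp), List.find?_cons_of_neg (by simpa using hp)]
      exact ih h.2

theorem idx_row (j : Int) (seen : PySem.Dict String Int)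
    (idx : PySem.Dict String (List (Int × Int))) (lang : String)
    (hfind : seen.items.filter (fun p => p.1 == lang) =
      (match seen.items.find? (fun p => p.1 == lang) with | some p => [p] | none => [])) :
    (seen.items.foldl (fun d lw => d.modify lw.1 [] (fun l => l ++ [(j, lw.2)])) idx).getD lang []
    = idx.getD lang [] ++ (match seen.get? lang with | some w => [(j, w)] | none => []) := by
  have h1 : seen.items.foldl (fun d lw => d.modify lw.1 [] (fun l => l ++ [(j, lw.2)])) idx
      = ((seen.items.map (fun lw => (lw.1, (j, lw.2)))).foldl
          (fun d p => d.modify p.1 [] (fun l => l ++ [p.2])) idx) := by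
    rw [List.foldl_map]
  rw [h1, PySem.Dict.getD_foldl_modify_append]
  congr 1
  rw [List.filter_map]
  have hcomp : ((fun p => p.1 == lang) ∘ (fun (lw : String × Int) => (lw.1, ((j, lw.2) : Int × Int))))
      = fun lw => lw.1 == lang := rfl
  rw [hcomp, hfind]
  cases h : seen.items.find? (fun p => p.1 == lang) with
  | none =>
    have : seen.get? lang = none := by
      simp only [PySem.Dict.get?]
      rw [h]; rfl
    simp [this]
  | some p =>
    have hp1 : p.1 = lang := by
      have := List.find?_some h
      simpa using this
    have : seen.get? lang = some p.2 := by
      simp only [PySem.Dict.get?]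
      rw [h]; rfl
    simp [this, hp1]

-- the seen dict of a row looks up to wOpt
theorem seen_of_row (row : String) (lang : String) :
    ((PySem.List.enumerate (rowLangs row).reverse).foldl
      (fun (d : PySem.Dict String Int) pl =>
        if d.contains pl.2 then d else d.insert pl.2 (pl.1 + 1)) PySem.Dict.empty).get? lang
    = wOpt row lang := by
  rw [seen_get]
  rw [if_neg (by simp [PySem.Dict.contains_empty])]
  unfold wOpt
  simp

theorem build_inv (lang : String) : ∀ (t : List String) (s : Int)
    (jobsAcc : List String) (dAcc : PySem.Dict String (List (Int × Int))),
    ((PySem.List.enumerate t s).foldl bstep (jobsAcc, dAcc)).1 = jobsAcc ++ t.map jobOf ∧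
    ((PySem.List.enumerate t s).foldl bstep (jobsAcc, dAcc)).2.getD lang []
      = dAcc.getD lang [] ++ entriesFor t s lang := by
  intro t
  induction t with
  | nil => intro s ja da; simp [PySem.List.enumerate, entriesFor]
  | cons r t ih =>
    intro s ja da
    rw [PySem.List.enumerate_cons]
    simp only [List.foldl_cons]
    have hseen := seen_of_row r lang
    set seen := (PySem.List.enumerate (rowLangs r).reverse).foldl
      (fun (d : PySem.Dict String Int) pl =>
        if d.contains pl.2 then d else d.insert pl.2 (pl.1 + 1)) PySem.Dict.empty with hseendef
    have hnd : (seen.items.map (·.1)).Nodup := by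
      have := seen_nodup (PySem.List.enumerate (rowLangs r).reverse) PySem.Dict.empty
        PySem.Dict.nodup_keys_empty
      rw [← hseendef] at this
      simpa [PySem.Dict.keys] using this
    have hstep : bstep (ja, da) (s, r) =
        (ja ++ [jobOf r],
         seen.items.foldl (fun d lw => d.modify lw.1 [] (fun l => l ++ [(s, lw.2)])) da) := by
      simp only [bstep, hseendef, jobOf, rowLangs]
    rw [hstep]
    obtain ⟨h1, h2⟩ := ih (s + 1) (ja ++ [jobOf r]) _
    refine ⟨by rw [h1]; simp, ?_⟩
    rw [h2, idx_row s seen _ lang (filter_items_eq lang seen.items hnd), hseen]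
    have hent : entriesFor (r :: t) s lang =
        (match wOpt r lang with | some w => [(s, w)] | none => []) ++ entriesFor t (s + 1) lang := by
      unfold entriesFor
      rw [PySem.List.enumerate_cons]
      cases h : wOpt r lang <;> simp [h]
    rw [hent, List.append_assoc]

theorem enum_map {α β : Type} (f : α → β) (xs : List α) : ∀ s : Int,
    PySem.List.enumerate (xs.map f) s = (PySem.List.enumerate xs s).map (fun p => (p.1, f p.2)) := by
  induction xs with
  | nil => intro s; simp [PySem.List.enumerate]
  | cons x t ih => intro s; simp [PySem.List.enumerate_cons, ih]

theorem foldl_len_inv {α : Type} (f : List Int → α → List Int)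
    (h : ∀ acc x, (f acc x).length = acc.length) :
    ∀ (l : List α) (s : List Int), (l.foldl f s).length = s.length := by
  intro l
  induction l with
  | nil => intro s; rfl
  | cons x t ih => intro s; simp only [List.foldl_cons]; rw [ih, h]

-- A's inner j-loop over all rows equals B's loop over the inverted-index entries
theorem inner_eq (table : List String) (lang : String) (pref : Int) (score : List Int) :
    (PySem.List.pyRange 0 ((table.map (fun row => (rowLangs row).reverse)).length : Int)).foldl
      (fun score j =>
        if lang ∈ PySem.List.pyGetD (table.map (fun row => (rowLangs row).reverse)) j [] then
          score.set j.toNat (PySem.List.pyGetD score j 0 +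
            (((PySem.List.index?
                (PySem.List.pyGetD (table.map (fun row => (rowLangs row).reverse)) j []) lang).getD 0 : Int) + 1) * pref)
        else score) score
    = (entriesFor table 0 lang).foldl
        (fun score jw => score.set jw.1.toNat (score.getD jw.1.toNat 0 + jw.2 * pref)) score := by
  set tblA := table.map (fun row => (rowLangs row).reverse) with htbl
  have h1 := PySem.List.enumerate_eq_map_pyRange (xs := tblA) []
  simp only [PySem.List.len_eq] at h1
  have h2 : (PySem.List.pyRange 0 (tblA.length : Int)).foldl
      (fun score j =>
        if lang ∈ PySem.List.pyGetD tblA j [] then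
          score.set j.toNat (PySem.List.pyGetD score j 0 +
            (((PySem.List.index? (PySem.List.pyGetD tblA j []) lang).getD 0 : Int) + 1) * pref)
        else score) score
      = (PySem.List.enumerate tblA 0).foldl
        (fun score p =>
          if lang ∈ p.2 then
            score.set p.1.toNat (PySem.List.pyGetD score p.1 0 +
              (((PySem.List.index? p.2 lang).getD 0 : Int) + 1) * pref)
          else score) score := by
    rw [h1, List.foldl_map]
  rw [h2, enum_map, List.foldl_map]
  unfold entriesFor
  rw [List.foldl_filterMap]
  apply PySem.List.foldl_congr_mem
  intro acc jr hjr
  obtain ⟨k, hk, rfl⟩ := (PySem.List.mem_enumerate_iff table 0 jr).1 hjr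
  simp only []
  cases hidx : PySem.List.index? (rowLangs table[k]).reverse lang with
  | none =>
    have hw : wOpt (table[k]) lang = none := by unfold wOpt; rw [hidx]; rfl
    have hmem : lang ∉ (rowLangs table[k]).reverse := (PySem.List.index?_eq_none_iff _ _).1 hidx
    rw [hw, if_neg hmem]
    simp
  | some kk =>
    have hw : wOpt (table[k]) lang = some ((kk : Int) + 1) := by unfold wOpt; rw [hidx]; rfl
    have hmem : lang ∈ (rowLangs table[k]).reverse :=
      (PySem.List.index?_isSome_iff _ _).1 (by rw [hidx]; rfl)
    rw [hw, if_pos hmem]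
    simp [PySem.List.pyGetD_natCast]

theorem foldl_range_eq_zip {β : Type} (H : String → Int → β → β) :
    ∀ (xs : List String) (ys : List Int) (init : β),
    (∀ k acc, ys.length ≤ k → k < xs.length → H (xs.getD k "") 0 acc = acc) →
    (List.range xs.length).foldl (fun acc k => H (xs.getD k "") (ys.getD k 0) acc) init
    = (xs.zip ys).foldl (fun acc lp => H lp.1 lp.2 acc) init := by
  intro xs
  induction xs with
  | nil => intro ys init _; simp
  | cons x xs ih =>
    intro ys init hid
    rw [show (x :: xs).length = xs.length + 1 from rfl, List.range_succ_eq_map,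
        List.foldl_cons, List.foldl_map]
    simp only [List.getD_cons_zero, List.getD_cons_succ]
    cases ys with
    | nil =>
      simp only [List.zip_nil_right, List.foldl_nil, List.getD_nil]
      rw [show H x 0 init = init from by simpa using hid 0 init (by simp) (by simp)]
      have hsteps : ∀ (acc : β) (k : Nat), k ∈ List.range xs.length →
          H (xs.getD k "") 0 acc = acc := by
        intro acc k hk
        exact hid (k + 1) acc (by simp) (by simpa using List.mem_range.1 hk)
      calc (List.range xs.length).foldl (fun acc k => H (xs.getD k "") 0 acc) init
          = (List.range xs.length).foldl (fun acc _ => acc) init :=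
            PySem.List.foldl_congr_mem _ _ _ _ hsteps
        _ = init := PySem.List.foldl_ignore _ _
    | cons y ys =>
      simp only [List.getD_cons_zero, List.getD_cons_succ, List.zip_cons_cons, List.foldl_cons]
      exact ih (y :: ys).tail (H x y init) (fun k acc h1 h2 => hid (k + 1) acc (by simpa using h1) (by simpa using h2))

theorem head_sorted_eq_min (l : List String) (hne : l ≠ []) :
    (PySem.List.sorted l (fun x => x)).headD "" = (PySem.List.min? l (fun x => x)).getD "" := by
  obtain ⟨m, hm⟩ : ∃ m, PySem.List.min? l (fun x => x) = some m := by
    cases h : PySem.List.min? l (fun x => x) with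
    | none => exact absurd ((PySem.List.min?_eq_none_iff l _).1 h) hne
    | some m => exact ⟨m, rfl⟩
  cases hs : PySem.List.sorted l (fun x => x) with
  | nil => exact absurd ((PySem.List.sorted_eq_nil_iff l _ false).1 hs) hne
  | cons h t =>
    rw [hm]
    simp only [List.headD_cons, Option.getD_some]
    have hhm : h ≤ m := PySem.List.key_head_sorted_le l _ hs m (PySem.List.min?_mem hm)
    have hmem : h ∈ l := by
      rw [← PySem.List.mem_sorted l (fun x => x) false, hs]; exact List.mem_cons_self
    have hmh : m ≤ h := PySem.List.min?_isMin hm h hmem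
    exact le_antisymm hhm hmh

theorem row_pop (row : String) :
    ((PySem.List.pop? ((PySem.Str.split? row " ").getD []).reverse).map (·.1)).getD ""
      = ((PySem.Str.split? row " ").getD []).headD "" ∧
    ((PySem.List.pop? ((PySem.Str.split? row " ").getD []).reverse).map (·.2)).getD []
      = (((PySem.Str.split? row " ").getD []).drop 1).reverse := by
  have hne : ((PySem.Str.split? row " ").getD []) ≠ [] := split_ne_nil row
  cases hp : (PySem.Str.split? row " ").getD [] with
  | nil => exact absurd hp hne
  | cons h t =>
    rw [List.reverse_cons, PySem.List.pop?_last]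
    simp


-- common canonical forms reached from both ports (proof-only helpers)
def jobsC (t : List String) : List String := t.map jobOf
def scoreC (t l : List String) (p : List Int) : List Int :=
  (l.zip p).foldl (fun score lp =>
    (entriesFor t 0 lp.1).foldl (fun score jw =>
      score.set jw.1.toNat (score.getD jw.1.toNat 0 + jw.2 * lp.2)) score)
    ((jobsC t).map (fun _ => (0 : Int)))
def recsC (t l : List String) (p : List Int) : List String :=
  ((jobsC t).zip (scoreC t l p)).foldl (fun acc pr =>
    if pr.2 = (PySem.List.max? (scoreC t l p) (fun x => x)).getD 0 then acc ++ [pr.1] else acc) []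

theorem solutionB_eq (t l : List String) (p : List Int) :
    solution_alt t l p = (PySem.List.min? (recsC t l p) (fun x => x)).getD "" := by
  have h0 : solution_alt t l p =
      (let ji := (PySem.List.enumerate t).foldl bstep ([], PySem.Dict.empty)
       let score := (l.zip p).foldl (fun score lp =>
         (ji.2.getD lp.1 []).foldl (fun score jw =>
           score.set jw.1.toNat (score.getD jw.1.toNat 0 + jw.2 * lp.2)) score)
         (ji.1.map (fun _ => (0 : Int)))
       (PySem.List.min? ((ji.1.zip score).foldl (fun acc pr =>
         if pr.2 = (PySem.List.max? score (fun x => x)).getD 0 then acc ++ [pr.1] else acc) [])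
         (fun x => x)).getD "") := rfl
  rw [h0]
  have hji1 : ((PySem.List.enumerate t).foldl bstep ([], PySem.Dict.empty)).1 = jobsC t := by
    have := (build_inv "" t 0 [] PySem.Dict.empty).1
    simpa [jobsC] using this
  have hidx : ∀ lang, ((PySem.List.enumerate t).foldl bstep ([], PySem.Dict.empty)).2.getD lang []
      = entriesFor t 0 lang := by
    intro lang
    have := (build_inv lang t 0 [] PySem.Dict.empty).2
    simpa [PySem.Dict.getD_empty] using this
  simp only [hji1, hidx]
  rfl


theorem entries_nil (t : List String) (s : Int) (lang : String)
    (h : ∀ row ∈ t, lang ∉ rowLangs row) : entriesFor t s lang = [] := by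
  unfold entriesFor
  rw [List.filterMap_eq_nil_iff]
  intro jr hjr
  obtain ⟨k, hk, rfl⟩ := (PySem.List.mem_enumerate_iff t s jr).1 hjr
  have hnone : PySem.List.index? (rowLangs t[k]).reverse lang = none := by
    rw [PySem.List.index?_eq_none_iff]
    simpa using h t[k] (List.getElem_mem hk)
  unfold wOpt
  rw [hnone]
  rfl

theorem scoreC_len (t l : List String) (p : List Int) : (scoreC t l p).length = t.length := by
  unfold scoreC
  rw [foldl_len_inv _ (fun acc lp => foldl_len_inv _ (fun a jw => List.length_set) _ acc) _ _]
  simp [jobsC]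

theorem solutionA_eq (t l : List String) (p : List Int) (hpre : Pre_solution t l p) :
    solution t l p = (PySem.List.sorted (recsC t l p) (fun x => x)).headD "" := by
  have h0 : solution t l p =
      (let tbl := (t.map (fun s => ((PySem.Str.split? s " ").getD []).reverse)).map
         (fun arr => ((PySem.List.pop? arr).map (·.2)).getD [])
       let jobs := (t.map (fun s => ((PySem.Str.split? s " ").getD []).reverse)).map
         (fun arr => ((PySem.List.pop? arr).map (·.1)).getD "")
       let score := (PySem.List.pyRange 0 (l.length : Int)).foldl (fun score i =>
         (PySem.List.pyRange 0 (tbl.length : Int)).foldl (fun score j =>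
           if PySem.List.pyGetD l i "" ∈ PySem.List.pyGetD tbl j [] then
             score.set j.toNat (PySem.List.pyGetD score j 0 +
               (((PySem.List.index? (PySem.List.pyGetD tbl j []) (PySem.List.pyGetD l i "")).getD 0 : Int) + 1) *
                 PySem.List.pyGetD p i 0)
           else score) score) (jobs.map (fun _ => (0 : Int)))
       let recs := (PySem.List.pyRange 0 (score.length : Int)).foldl (fun acc i =>
         if PySem.List.pyGetD score i 0 = (PySem.List.max? score (fun x => x)).getD 0 then
           acc ++ [PySem.List.pyGetD jobs i ""]
         else acc) ([] : List String)
       (PySem.List.sorted recs (fun x => x)).headD "") := rfl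
  rw [h0]
  have htbl : (t.map (fun s => ((PySem.Str.split? s " ").getD []).reverse)).map
      (fun arr => ((PySem.List.pop? arr).map (·.2)).getD []) = t.map (fun row => (rowLangs row).reverse) := by
    rw [List.map_map]
    exact List.map_congr_left (fun row _ => (row_pop row).2)
  have hjobs : (t.map (fun s => ((PySem.Str.split? s " ").getD []).reverse)).map
      (fun arr => ((PySem.List.pop? arr).map (·.1)).getD "") = jobsC t := by
    rw [List.map_map]
    exact List.map_congr_left (fun row _ => (row_pop row).1)
  simp only [htbl, hjobs]
  have hscore : (PySem.List.pyRange 0 (l.length : Int)).foldl (fun score i =>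
      (PySem.List.pyRange 0 ((t.map (fun row => (rowLangs row).reverse)).length : Int)).foldl (fun score j =>
        if PySem.List.pyGetD l i "" ∈ PySem.List.pyGetD (t.map (fun row => (rowLangs row).reverse)) j [] then
          score.set j.toNat (PySem.List.pyGetD score j 0 +
            (((PySem.List.index? (PySem.List.pyGetD (t.map (fun row => (rowLangs row).reverse)) j [])
                (PySem.List.pyGetD l i "")).getD 0 : Int) + 1) *
              PySem.List.pyGetD p i 0)
        else score) score) ((jobsC t).map (fun _ => (0 : Int)))
      = scoreC t l p := by
    rw [PySem.List.pyRange_one 0 (l.length : Int), List.foldl_map]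
    simp only [Int.sub_zero, Int.toNat_natCast, zero_add, PySem.List.pyGetD_natCast]
    have hstep : ∀ (acc : List Int), ∀ k ∈ List.range l.length,
        (PySem.List.pyRange 0 ((t.map (fun row => (rowLangs row).reverse)).length : Int)).foldl
          (fun score j =>
            if l.getD k "" ∈ PySem.List.pyGetD (t.map (fun row => (rowLangs row).reverse)) j [] then
              score.set j.toNat (PySem.List.pyGetD score j 0 +
                (((PySem.List.index? (PySem.List.pyGetD (t.map (fun row => (rowLangs row).reverse)) j [])
                    (l.getD k "")).getD 0 : Int) + 1) * p.getD k 0)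
            else score) acc
        = (entriesFor t 0 (l.getD k "")).foldl (fun score jw =>
            score.set jw.1.toNat (score.getD jw.1.toNat 0 + jw.2 * p.getD k 0)) acc :=
      fun acc k _ => inner_eq t (l.getD k "") (p.getD k 0) acc
    rw [PySem.List.foldl_congr_mem _ _ _ _ hstep]
    exact foldl_range_eq_zip
      (fun lang pref (acc : List Int) => (entriesFor t 0 lang).foldl (fun (score : List Int) (jw : Int × Int) =>
        score.set jw.1.toNat (score.getD jw.1.toNat 0 + jw.2 * pref)) acc) l p _
      (fun k acc h1 h2 => by
        simp only [entries_nil t 0 _ (fun row hrow => hpre.2 k h2 h1 row hrow)]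
        rfl)
  simp only [hscore]
  have hlen : ((scoreC t l p).length : Int) = ((jobsC t).length : Int) := by
    rw [scoreC_len]; simp [jobsC]
  have hrecs : (PySem.List.pyRange 0 ((scoreC t l p).length : Int)).foldl (fun acc i =>
      if PySem.List.pyGetD (scoreC t l p) i 0 = (PySem.List.max? (scoreC t l p) (fun x => x)).getD 0 then
        acc ++ [PySem.List.pyGetD (jobsC t) i ""]
      else acc) ([] : List String) = recsC t l p := by
    rw [hlen, PySem.List.pyRange_one, List.foldl_map]
    simp only [Int.sub_zero, Int.toNat_natCast, zero_add, PySem.List.pyGetD_natCast]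
    exact foldl_range_eq_zip
      (fun job sc (acc : List String) => if sc = (PySem.List.max? (scoreC t l p) (fun x => x)).getD 0 then
        acc ++ [job] else acc) (jobsC t) (scoreC t l p) []
      (fun k acc h1 h2 => by
        rw [scoreC_len] at h1
        simp only [jobsC, List.length_map] at h2
        exact absurd h2 (by omega))
  simp only [hrecs]

theorem recsC_ne_nil (t l : List String) (p : List Int) (h : t ≠ []) : recsC t l p ≠ [] := by
  unfold recsC
  rw [PySem.List.foldl_append_ite
    (p := fun pr : String × Int => pr.2 = (PySem.List.max? (scoreC t l p) (fun x => x)).getD 0)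
    (f := fun pr : String × Int => pr.1)]
  have hS : scoreC t l p ≠ [] := by
    intro hnil
    have := scoreC_len t l p
    rw [hnil] at this
    exact h (List.eq_nil_of_length_eq_zero this.symm)
  obtain ⟨m, hm⟩ : ∃ m, PySem.List.max? (scoreC t l p) (fun x => x) = some m := by
    cases hmm : PySem.List.max? (scoreC t l p) (fun x => x) with
    | none => exact absurd ((PySem.List.max?_eq_none_iff _ _).1 hmm) hS
    | some m => exact ⟨m, rfl⟩
  obtain ⟨k, hk, hSk⟩ := List.mem_iff_getElem.1 (PySem.List.max?_mem hm)
  have hkz : k < ((jobsC t).zip (scoreC t l p)).length := by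
    rw [List.length_zip]
    simp only [jobsC, List.length_map]
    rw [scoreC_len] at hk ⊢
    omega
  have hmem : ((jobsC t)[k]'(by rw [List.length_zip] at hkz; omega),
      (scoreC t l p)[k]'hk) ∈ (jobsC t).zip (scoreC t l p) := by
    rw [← List.getElem_zip (h := hkz)]
    exact List.getElem_mem hkz
  intro hnil
  rw [List.nil_append] at hnil
  have hfil := List.map_eq_nil_iff.1 hnil
  rw [List.filter_eq_nil_iff] at hfil
  exact hfil _ hmem (by simp [hSk, hm])

-- ===== VERDICT (by name: the statement is the Claim_ definition above) =====
theorem solution_spec : Claim_equal_solution := by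
  intro table languages preference _ hpre
  unfold Spec_solution
  rw [solutionA_eq table languages preference hpre, solutionB_eq]
  exact head_sorted_eq_min _ (recsC_ne_nil table languages preference hpre.1)
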